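-- pv_equiv track=rewrite | github.com/Donghunn-Lee/CodingTest | 백준/Silver/5525. IOIOI/IOIOI.py | get_sub_cnt
-- ===== SOURCE A (Python) =====
-- def get_sub_cnt(string, start):
--     cnt = 1
--     while True:
--         if string[start:start+2] == 'OI':
--             cnt += 1
--             start += 2
--         else:
--             return cnt
-- ===== SOURCE B (Python) =====
-- def get_sub_cnt(string, start):
--     tail = string[start:]
--     m = next((i for i, ch in enumerate(tail) if ch != "OI"[i % 2]), len(tail))
--     return m // 2 + 1
-- ===== Notes on version B (the rewrite author's own statement) =====
-- stated objective: idiomatic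
-- what changed: B slices the tail once and finds the first character-wise mismatch against the cyclic pattern 'OIOI...' (an enumerate/next one-liner), returning mismatch_index // 2 + 1, instead of A's unbounded while-loop that repeatedly re-slices two-character windows and counts pairs.
-- outside the precondition, e.g. on get_sub_cnt('OIOI', -4): A returns 2, B returns 3
import Mathlib
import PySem

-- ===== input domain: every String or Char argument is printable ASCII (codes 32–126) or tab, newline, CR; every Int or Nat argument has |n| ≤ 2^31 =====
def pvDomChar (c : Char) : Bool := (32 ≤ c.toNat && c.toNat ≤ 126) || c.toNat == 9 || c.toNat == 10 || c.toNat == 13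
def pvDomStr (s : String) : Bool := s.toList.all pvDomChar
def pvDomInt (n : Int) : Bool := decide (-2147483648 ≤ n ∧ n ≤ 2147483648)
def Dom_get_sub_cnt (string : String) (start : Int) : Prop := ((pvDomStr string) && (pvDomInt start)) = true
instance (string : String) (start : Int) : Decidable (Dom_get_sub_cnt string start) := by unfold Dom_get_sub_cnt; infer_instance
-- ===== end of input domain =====

-- B replaces A's two-character re-slicing while-loop by a single slice of the tail plus a
-- character-wise first-mismatch scan against the cyclic pattern "OI" (same cost, more idiomatic).


-- ===== PORT A =====
-- if a two-char slice equals "OI" the slice reaches index start+2, so start+2 ≤ length (termination)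
theorem pvSliceOI_le (l : List Char) (start : Int)
    (h : PySem.List.slice l (some start) (some (start + 2)) = ['O', 'I']) :
    start + 2 ≤ (l.length : Int) := by
  have hlen := congrArg List.length h
  rw [PySem.List.length_slice] at hlen
  simp only [List.length_cons, List.length_nil] at hlen
  have h1 := PySem.List.clampIdx_le l.length start
  have h2 := PySem.List.clampIdx_le l.length (start + 2)
  simp only [PySem.List.clampIdx] at hlen h1 h2
  split_ifs at hlen h1 h2 <;> omega

-- the while-True loop of A: state (start, cnt)
def pvLoopA (l : List Char) (start cnt : Int) : Int :=
  if h : PySem.List.slice l (some start) (some (start + 2)) = ['O', 'I'] then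
    pvLoopA l (start + 2) (cnt + 1)
  else
    cnt
termination_by ((l.length : Int) - start).toNat
decreasing_by
  have := pvSliceOI_le l start h
  omega

def get_sub_cnt (string : String) (start : Int) : Int :=
  pvLoopA string.toList start 1

-- ===== PORT B =====
-- first index i at which cs[i] ≠ "OI"[i % 2] (returning the running index; = len if none)
def pvMismatch (cs : List Char) (i : Nat) : Nat :=
  match cs with
  | [] => i
  | c :: rest =>
      if c ≠ (if i % 2 = 0 then 'O' else 'I') then i else pvMismatch rest (i + 1)

def get_sub_cnt_alt (string : String) (start : Int) : Int :=
  let tail := PySem.List.slice string.toList (some start) none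
  PySem.Int.floordiv (pvMismatch tail 0 : Int) 2 + 1

-- ===== PRECONDITION & SPEC =====
-- Pre_ excludes negative start, where Python's negative-slice wraparound makes both A's
-- two-character-window result and B's whole-tail result accidental artefacts of slicing;
-- neither behaviour is the specified one on such inputs.
def Pre_get_sub_cnt (string : String) (start : Int) : Prop := 0 ≤ start
instance (string : String) (start : Int) : Decidable (Pre_get_sub_cnt string start) := by
  unfold Pre_get_sub_cnt; infer_instance

def pvWitness_get_sub_cnt : String × Int := ("OIOIX", 0)

def Spec_get_sub_cnt (string : String) (start : Int) (out : Int) : Prop :=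
  out = get_sub_cnt_alt string start
instance (string : String) (start : Int) (out : Int) : Decidable (Spec_get_sub_cnt string start out) := by
  unfold Spec_get_sub_cnt; infer_instance

-- ===== CLAIM (what is proved, stated in full; the proofs are below) =====
def Claim_equal_get_sub_cnt : Prop :=
  ∀ (string : String) (start : Int), Dom_get_sub_cnt string start →
    Pre_get_sub_cnt string start → Spec_get_sub_cnt string start (get_sub_cnt string start)

-- ===== LEMMAS AND PROOFS =====

-- number of leading "OI" pairs of a character list (the common characterisation)
def pvPairs : List Char → Int
  | [] => 0
  | [_] => 0
  | c :: d :: r => if c = 'O' ∧ d = 'I' then 1 + pvPairs r else 0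

theorem pvLoopA_eq (l : List Char) (start : Int) (h0 : 0 ≤ start) (cnt : Int) :
    pvLoopA l start cnt = cnt + pvPairs (l.drop start.toNat) := by
  fun_induction pvLoopA l start cnt with
  | case1 start cnt h ih =>
      have h2 : (0:Int) ≤ start + 2 := by omega
      rw [PySem.List.slice_toNat l h0 h2,
          show (start + 2).toNat - start.toNat = 2 by omega] at h
      have hdrop : l.drop start.toNat = 'O' :: 'I' :: l.drop (start.toNat + 2) := by
        cases hd : l.drop start.toNat with
        | nil => rw [hd] at h; simp at h
        | cons a t =>
          cases ht : t with
          | nil => rw [hd, ht] at h; simp at h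
          | cons b t2 =>
            rw [hd, ht] at h
            simp at h
            obtain ⟨ha, hb⟩ := h
            subst ha; subst hb
            have h22 : List.drop (start.toNat + 2) l = t2 := by
              have e : List.drop (start.toNat + 2) l = List.drop 2 (List.drop start.toNat l) := by
                rw [List.drop_drop]
              rw [e, hd, ht]; rfl
            rw [h22]
      rw [ih (by omega), hdrop, show (start + 2).toNat = start.toNat + 2 by omega]
      simp [pvPairs]
      ring
  | case2 start cnt h =>
      have h2 : (0:Int) ≤ start + 2 := by omega
      rw [PySem.List.slice_toNat l h0 h2,
          show (start + 2).toNat - start.toNat = 2 by omega] at h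
      cases hd : l.drop start.toNat with
      | nil => simp [pvPairs]
      | cons a t =>
        cases ht : t with
        | nil => simp [pvPairs]
        | cons b t2 =>
          have hp : pvPairs (a :: b :: t2) = 0 := by
            simp only [pvPairs]
            rw [if_neg]
            rintro ⟨ha, hb⟩
            exact h (by rw [hd, ht, ha, hb]; rfl)
          rw [hp]; ring

theorem pvMismatch_shift (cs : List Char) (i : Nat) :
    pvMismatch cs (i + 1 + 1) = pvMismatch cs i + 2 := by
  induction cs generalizing i with
  | nil => rfl
  | cons c rest ih =>
      simp only [pvMismatch, show (i + 1 + 1) % 2 = i % 2 by omega]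
      split_ifs <;> simp [ih]

theorem pvMismatch_div2 (cs : List Char) :
    PySem.Int.floordiv (pvMismatch cs 0 : Int) 2 = pvPairs cs := by
  induction cs using pvPairs.induct with
  | case1 => decide
  | case2 c =>
      simp only [pvMismatch, pvPairs]
      split_ifs <;> decide
  | case3 c d r hcd ih =>
      obtain ⟨hc, hd⟩ := hcd
      subst hc; subst hd
      have hm : pvMismatch ('O' :: 'I' :: r) 0 = pvMismatch r 0 + 2 := by
        simp only [pvMismatch]
        rw [pvMismatch_shift r 0]
        norm_num
      have hp : pvPairs ('O' :: 'I' :: r) = 1 + pvPairs r := by simp [pvPairs]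
      have e1 : PySem.Int.floordiv ((pvMismatch r 0 + 2 : Nat) : Int) 2
          = (((pvMismatch r 0 + 2) / 2 : Nat) : Int) := by
        exact_mod_cast PySem.Int.floordiv_natCast (pvMismatch r 0 + 2) 2
      have e2 : PySem.Int.floordiv ((pvMismatch r 0 : Nat) : Int) 2
          = ((pvMismatch r 0 / 2 : Nat) : Int) := by
        exact_mod_cast PySem.Int.floordiv_natCast (pvMismatch r 0) 2
      rw [hm, hp, e1, show (pvMismatch r 0 + 2) / 2 = pvMismatch r 0 / 2 + 1 by omega]
      rw [e2] at ih
      push_cast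
      push_cast at ih
      rw [ih]; ring
  | case4 c d r hcd =>
      have hp : pvPairs (c :: d :: r) = 0 := by simp [pvPairs, hcd]
      rw [hp]
      by_cases hc : c = 'O'
      · have hd : d ≠ 'I' := fun h => hcd ⟨hc, h⟩
        subst hc
        have hm : pvMismatch ('O' :: d :: r) 0 = 1 := by simp [pvMismatch, hd]
        rw [hm]; decide
      · have hm : pvMismatch (c :: d :: r) 0 = 0 := by simp [pvMismatch, hc]
        rw [hm]; decide

theorem get_sub_cnt_spec : Claim_equal_get_sub_cnt := by
  intro s start _hDom hPre
  have h0 : 0 ≤ start := hPre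
  unfold Spec_get_sub_cnt
  simp only [get_sub_cnt, get_sub_cnt_alt]
  rw [pvLoopA_eq s.toList start h0 1,
      PySem.List.slice_from s.toList h0, pvMismatch_div2]
  ring
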